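-- pv_equiv track=rewrite | github.com/hsaest/QUERT | data_preprocess.py | add_sub_symbol_for_poi
-- ===== SOURCE A (Python) =====
-- from typing import List
--
-- def add_sub_symbol_for_poi(bert_tokens: List[str], query_poi_set: set()):
--     if not query_poi_set:
--         return bert_tokens
--     max_word_len = max([len(w) for w in query_poi_set])
--
--     bert_word = bert_tokens
--     start, end = 0, len(bert_word)
--
--     while start < end:
--         single_word = True
--         l = min(end - start, max_word_len)
--         for i in range(l, 1, -1):
--             whole_word = "".join(bert_word[start: start + i])
--
--             if whole_word in query_poi_set:
--                 for j in range(start + 1, start + i):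
--                     bert_word[j] = "##" + bert_word[j]
--                 start = start + i
--                 single_word = False
--                 break
--
--         if single_word:
--             start += 1
--
--     return bert_word
-- ===== SOURCE B (Python) =====
-- from typing import List
--
-- def add_sub_symbol_for_poi(bert_tokens: List[str], query_poi_set: set()):
--     if not query_poi_set:
--         return bert_tokens
--     max_word_len = max(len(w) for w in query_poi_set)
--     poi = set(query_poi_set)
--     n = len(bert_tokens)
--     out = []
--     i = 0
--     while i < n:
--         # scan forward, growing the concatenation once per token (no re-joins),
--         # remembering the longest window (>= 2 tokens) that is a POI
--         acc = bert_tokens[i]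
--         best = 0
--         j = i + 1
--         while j < n and j - i < max_word_len:
--             acc += bert_tokens[j]
--             j += 1
--             if acc in poi:
--                 best = j - i
--         if best >= 2:
--             out.append(bert_tokens[i])
--             out.extend("##" + t for t in bert_tokens[i + 1:i + best])
--             i += best
--         else:
--             out.append(bert_tokens[i])
--             i += 1
--     return out
-- ===== Notes on version B (the rewrite author's own statement) =====
-- stated objective: alternative
-- what changed: Instead of re-joining every candidate window from scratch while scanning window lengths downward (and mutating the token list in place), B extends one running concatenation forward per start position, remembers the longest POI match, and emits the marked tokens into a fresh output list.
import Mathlib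
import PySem

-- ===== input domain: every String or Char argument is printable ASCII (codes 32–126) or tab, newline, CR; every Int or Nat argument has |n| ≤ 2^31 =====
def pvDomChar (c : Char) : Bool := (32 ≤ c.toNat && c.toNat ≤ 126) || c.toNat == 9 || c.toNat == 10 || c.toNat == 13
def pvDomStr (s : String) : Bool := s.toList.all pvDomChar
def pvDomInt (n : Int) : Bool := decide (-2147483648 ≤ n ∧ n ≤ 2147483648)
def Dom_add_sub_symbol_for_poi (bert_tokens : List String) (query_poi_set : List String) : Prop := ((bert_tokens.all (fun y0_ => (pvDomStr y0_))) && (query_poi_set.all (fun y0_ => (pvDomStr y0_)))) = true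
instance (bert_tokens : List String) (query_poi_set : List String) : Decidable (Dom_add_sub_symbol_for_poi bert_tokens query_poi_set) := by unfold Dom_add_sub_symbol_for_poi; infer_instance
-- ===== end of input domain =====

-- B replaces A's per-start downward scan that re-joins every candidate window from scratch by a single
-- forward scan growing one running concatenation, keeping the longest POI match; A mutates its input list
-- in place while B builds a fresh output list, so the equivalence proved here is about the RETURN value only.

-- ===== PORT A =====
-- "".join(ws)
def pvJoin (ws : List String) : String := PySem.Str.join "" ws

-- for i in range(l, 1, -1): first (i.e. largest) i ≥ 2 with "".join(bert_word[start:start+i]) in query_poi_set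
def pvFindA (bw : List String) (poi : List String) (start : Nat) : Nat → Option Nat
  | 0 => none
  | 1 => none
  | (i + 2) =>
    if poi.contains (pvJoin (PySem.List.slice bw (some (start : Int)) (some ((start : Int) + ((i + 2 : Nat) : Int))))) then
      some (i + 2)
    else pvFindA bw poi start (i + 1)

-- for j in range(start+1, start+i): bert_word[j] = "##" + bert_word[j]
def pvMark (bw : List String) (start : Nat) (i : Nat) : List String :=
  (List.range' (start + 1) (i - 1) 1).foldl (fun b j => b.set j ("##" ++ b.getD j "")) bw

-- the while loop (fuel = the token count bounds the number of iterations; start strictly increases)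
def pvLoopA (poi : List String) (maxLen : Int) : Nat → List String → Nat → List String
  | 0, bw, _ => bw
  | fuel + 1, bw, start =>
    if start < bw.length then
      match pvFindA bw poi start (min ((bw.length : Int) - (start : Int)) maxLen).toNat with
      | some i => pvLoopA poi maxLen fuel (pvMark bw start i) (start + i)
      | none => pvLoopA poi maxLen fuel bw (start + 1)
    else bw

def add_sub_symbol_for_poi (bert_tokens : List String) (query_poi_set : List String) : List String :=
  match query_poi_set with
  | [] => bert_tokens
  | q :: qs =>
    -- max([len(w) for w in query_poi_set]) over the nonempty set, as the running-max loop
    let maxLen : Int := (qs.map PySem.Str.len).foldl max (PySem.Str.len q)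
    pvLoopA (q :: qs) maxLen bert_tokens.length bert_tokens 0

-- ===== PORT B =====
-- inner while: grow acc by one token per step (k tokens consumed so far), remember the longest match
def pvScanB (poi : List String) (maxLen : Int) : List String → String → Nat → Nat → Nat
  | [], _, _, best => best
  | t :: ts, acc, k, best =>
    if (k : Int) < maxLen then
      let acc' := acc ++ t
      pvScanB poi maxLen ts acc' (k + 1) (if poi.contains acc' then k + 1 else best)
    else best

-- outer while: emit the start token, then the marked tail of the best window (if any), and continue
-- (fuel = the token count bounds the number of iterations)
def pvProcB (poi : List String) (maxLen : Int) : Nat → List String → List String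
  | _, [] => []
  | 0, _ :: _ => []
  | fuel + 1, w :: ws =>
    let best := pvScanB poi maxLen ws w 1 0
    if 2 ≤ best then
      w :: ((ws.take (best - 1)).map (fun t => "##" ++ t) ++ pvProcB poi maxLen fuel (ws.drop (best - 1)))
    else
      w :: pvProcB poi maxLen fuel ws

def add_sub_symbol_for_poi_alt (bert_tokens : List String) (query_poi_set : List String) : List String :=
  match query_poi_set with
  | [] => bert_tokens
  | q :: qs =>
    let maxLen : Int := (qs.map PySem.Str.len).foldl max (PySem.Str.len q)
    pvProcB (q :: qs) maxLen bert_tokens.length bert_tokens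

-- ===== PRECONDITION & SPEC =====
def Spec_add_sub_symbol_for_poi (bert_tokens : List String) (query_poi_set : List String) (out : List String) : Prop := out = add_sub_symbol_for_poi_alt bert_tokens query_poi_set
instance (bert_tokens : List String) (query_poi_set : List String) (out : List String) : Decidable (Spec_add_sub_symbol_for_poi bert_tokens query_poi_set out) := by unfold Spec_add_sub_symbol_for_poi; infer_instance

-- ===== CLAIM (what is proved, stated in full; the proofs are below) =====
def Claim_equal_add_sub_symbol_for_poi : Prop := ∀ (bert_tokens : List String) (query_poi_set : List String), Dom_add_sub_symbol_for_poi bert_tokens query_poi_set → Spec_add_sub_symbol_for_poi bert_tokens query_poi_set (add_sub_symbol_for_poi bert_tokens query_poi_set)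

-- ===== LEMMAS AND PROOFS =====

theorem pvMark_length (bw : List String) (start i : Nat) : (pvMark bw start i).length = bw.length := by
  unfold pvMark
  generalize List.range' (start + 1) (i - 1) 1 = js
  induction js generalizing bw with
  | nil => rfl
  | cons j js ih => simpa [List.foldl_cons] using ih (bw.set j ("##" ++ bw.getD j ""))

theorem pvJoin_toList (ws : List String) : (pvJoin ws).toList = (ws.map String.toList).flatten := by
  have h : ∀ xss : List (List Char), PySem.Chars.join [] xss = xss.flatten := by
    intro xss
    induction xss with
    | nil => rfl
    | cons x xs ih =>
      simp only [PySem.Chars.join, List.intercalate] at *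
      cases xs <;> simp_all [List.intersperse]
  simp [pvJoin, PySem.Str.join, h]

theorem pvJoin_singleton (w : String) : pvJoin [w] = w := by
  apply String.toList_inj.mp
  simp [pvJoin_toList]

theorem pvJoin_append_singleton (xs : List String) (x : String) :
    pvJoin (xs ++ [x]) = pvJoin xs ++ x := by
  apply String.toList_inj.mp
  simp [pvJoin_toList]

theorem pv_slice_take (bw : List String) (start i : Nat) :
    PySem.List.slice bw (some (start : Int)) (some ((start : Int) + (i : Int))) = (bw.drop start).take i :=
  PySem.List.slice_natCast_add bw start i

-- one-step unfolding of pvFindA in the uniform shape of A's descending for-loop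
theorem pvFindA_unfold (bw poi : List String) (start i : Nat) :
    pvFindA bw poi start i =
      if 2 ≤ i then
        if poi.contains (pvJoin (PySem.List.slice bw (some (start : Int)) (some ((start : Int) + (i : Int))))) then
          some i
        else pvFindA bw poi start (i - 1)
      else none := by
  match i with
  | 0 => rfl
  | 1 => rfl
  | (i + 2) =>
    rw [pvFindA, if_pos (by omega : 2 ≤ i + 2)]
    rfl

-- the descending first-match search returns none when nothing in [2, i0] matches
theorem pvFindA_eq_none {bw poi : List String} {start : Nat} (i0 : Nat)
    (h : ∀ j, 2 ≤ j → j ≤ i0 → poi.contains (pvJoin ((bw.drop start).take j)) = false) :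
    pvFindA bw poi start i0 = none := by
  induction i0 using Nat.strong_induction_on with
  | _ i0 ih =>
    rw [pvFindA_unfold]
    by_cases hi : 2 ≤ i0
    · rw [if_pos hi, pv_slice_take, h i0 hi le_rfl]
      simp only [Bool.false_eq_true, if_false]
      exact ih (i0 - 1) (by omega) (fun j h2 hle => h j h2 (by omega))
    · rw [if_neg hi]

-- and returns the largest match when one exists
theorem pvFindA_eq_some {bw poi : List String} {start : Nat} (i0 r : Nat)
    (h2 : 2 ≤ r) (hle : r ≤ i0)
    (hp : poi.contains (pvJoin ((bw.drop start).take r)) = true)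
    (hmax : ∀ j, r < j → j ≤ i0 → poi.contains (pvJoin ((bw.drop start).take j)) = false) :
    pvFindA bw poi start i0 = some r := by
  induction i0 using Nat.strong_induction_on with
  | _ i0 ih =>
    rw [pvFindA_unfold, if_pos (by omega : 2 ≤ i0), pv_slice_take]
    by_cases hr : r = i0
    · subst hr; rw [hp]; rfl
    · rw [hmax i0 (by omega) (by omega)]
      simp only [Bool.false_eq_true, if_false]
      exact ih (i0 - 1) (by omega) (by omega) (fun j hj hjle => hmax j hj (by omega))

-- characterisation of B's forward scan: it returns the largest matching window length in (k, M], else best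
theorem pvScanB_spec (poi : List String) (maxLen : Int) (tail : List String) :
    ∀ n k best, tail.length - k ≤ n →
    (pvScanB poi maxLen (tail.drop k) (pvJoin (tail.take k)) k best = best ∧
      ∀ j, k < j → j ≤ min tail.length maxLen.toNat →
        poi.contains (pvJoin (tail.take j)) = false) ∨
    (k < pvScanB poi maxLen (tail.drop k) (pvJoin (tail.take k)) k best ∧
      pvScanB poi maxLen (tail.drop k) (pvJoin (tail.take k)) k best ≤ min tail.length maxLen.toNat ∧
      poi.contains (pvJoin (tail.take (pvScanB poi maxLen (tail.drop k) (pvJoin (tail.take k)) k best))) = true ∧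
      ∀ j, pvScanB poi maxLen (tail.drop k) (pvJoin (tail.take k)) k best < j →
        j ≤ min tail.length maxLen.toNat →
        poi.contains (pvJoin (tail.take j)) = false) := by
  intro n
  induction n with
  | zero =>
    intro k best hn
    have hk : tail.length ≤ k := by omega
    rw [List.drop_eq_nil_of_le hk]
    exact Or.inl ⟨rfl, fun j hj hjle => by omega⟩
  | succ n ih =>
    intro k best hn
    by_cases hlen : tail.length ≤ k
    · rw [List.drop_eq_nil_of_le hlen]
      exact Or.inl ⟨rfl, fun j hj hjle => by omega⟩
    · push_neg at hlen
      have hdrop : tail.drop k = tail[k] :: tail.drop (k + 1) := List.drop_eq_getElem_cons hlen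
      rw [hdrop]
      simp only [pvScanB]
      by_cases hm : (k : Int) < maxLen
      · rw [if_pos hm]
        have hacc : pvJoin (tail.take k) ++ tail[k] = pvJoin (tail.take (k + 1)) := by
          rw [← pvJoin_append_singleton, List.take_concat_get' tail k hlen]
        rw [hacc]
        set best' := if poi.contains (pvJoin (tail.take (k + 1))) then k + 1 else best with hbest'
        have := ih (k + 1) best' (by omega)
        rcases this with ⟨heq, hnone⟩ | ⟨hlt, hle, hp, hmax⟩
        · by_cases hc : poi.contains (pvJoin (tail.take (k + 1))) = true
          · right
            rw [heq, hbest', if_pos hc]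
            refine ⟨by omega, by omega, hc, ?_⟩
            intro j hj hjle; exact hnone j (by omega) hjle
          · left
            rw [heq, hbest', if_neg hc]
            refine ⟨rfl, ?_⟩
            intro j hj hjle
            rcases Nat.lt_or_ge (k + 1) j with h' | h'
            · exact hnone j h' hjle
            · have : j = k + 1 := by omega
              subst this
              simpa using hc
        · right
          exact ⟨by omega, hle, hp, hmax⟩
      · rw [if_neg hm]
        left
        refine ⟨rfl, ?_⟩
        intro j hj hjle
        have : (k : Int) ≥ maxLen := by omega
        omega

-- pvMark rewrites the marked window explicitly
theorem pvMark_aux (bw : List String) (start : Nat) :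
    ∀ m, start + 1 + m ≤ bw.length →
      (List.range' (start + 1) m 1).foldl (fun b j => b.set j ("##" ++ b.getD j "")) bw
        = bw.take (start + 1) ++ ((bw.drop (start + 1)).take m).map (fun t => "##" ++ t) ++
            bw.drop (start + 1 + m) := by
  intro m
  induction m with
  | zero =>
    intro hle
    simp only [List.range', List.foldl_nil, List.take_zero, List.map_nil, List.append_nil,
      Nat.add_zero]
    rw [List.take_append_drop]
  | succ m ih =>
    intro hle
    rw [List.range'_1_concat, List.foldl_append, ih (by omega)]
    simp only [List.foldl_cons, List.foldl_nil]
    have hidx : start + 1 + m < bw.length := by omega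
    have hlen1 : (bw.take (start + 1)).length = start + 1 := by
      simp only [List.length_take]; omega
    have hlen2 : (((bw.drop (start + 1)).take m).map (fun t => "##" ++ t)).length = m := by
      simp only [List.length_map, List.length_take, List.length_drop]; omega
    have hdropc : bw.drop (start + 1 + m) = bw[start + 1 + m] :: bw.drop (start + 1 + (m + 1)) :=
      List.drop_eq_getElem_cons hidx
    rw [hdropc]
    rw [List.append_assoc]
    rw [List.getD_append_right _ _ _ _ (by omega)]
    rw [hlen1, List.getD_append_right _ _ _ _ (by omega)]
    rw [hlen2, show start + 1 + m - (start + 1) - m = 0 by omega]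
    simp only [List.getD_cons_zero]
    rw [← List.append_assoc]
    rw [List.set_append_right _ _ (by simp only [List.length_append]; omega)]
    rw [show start + 1 + m - (bw.take (start + 1) ++
        ((bw.drop (start + 1)).take m).map (fun t => "##" ++ t)).length = 0 by
      simp only [List.length_append]; omega]
    simp only [List.set_cons_zero]
    have htake : (bw.drop (start + 1)).take (m + 1)
        = (bw.drop (start + 1)).take m ++ [bw[start + 1 + m]] := by
      rw [← List.take_concat_get' _ m (by simp only [List.length_drop]; omega)]
      congr 1
      rw [List.getElem_drop]
    rw [htake]
    simp only [List.map_append, List.map_cons, List.map_nil, List.append_assoc,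
      List.cons_append, List.nil_append]

theorem pvMark_eq (bw : List String) (start i : Nat) (hle : start + i ≤ bw.length) (h1 : 1 ≤ i) :
    pvMark bw start i =
      bw.take (start + 1) ++ ((bw.drop (start + 1)).take (i - 1)).map (fun t => "##" ++ t) ++
        bw.drop (start + i) := by
  unfold pvMark
  have haux := pvMark_aux bw start (i - 1) (by omega)
  rw [show start + 1 + (i - 1) = start + i from by omega] at haux
  exact haux

-- the main loop equivalence
theorem pvLoopA_eq (poi : List String) (maxLen : Int) :
    ∀ n bw start, bw.length - start ≤ n →
      pvLoopA poi maxLen n bw start = bw.take start ++ pvProcB poi maxLen n (bw.drop start) := by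
  intro n
  induction n with
  | zero =>
    intro bw start hn
    rw [List.drop_eq_nil_of_le (by omega)]
    rw [pvLoopA, pvProcB, List.take_of_length_le (by omega), List.append_nil]
  | succ n ih =>
    intro bw start hn
    by_cases h : start < bw.length
    · have hdrop : bw.drop start = bw[start] :: bw.drop (start + 1) := List.drop_eq_getElem_cons h
      have htake1 : (bw.drop start).take 1 = [bw[start]] := by rw [hdrop]; rfl
      have hd1 : (bw.drop start).drop 1 = bw.drop (start + 1) := by rw [hdrop]; rfl
      have hL : (min ((bw.length : Int) - (start : Int)) maxLen).toNat
          = min (bw.drop start).length maxLen.toNat := by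
        simp only [List.length_drop]; omega
      have hscan := pvScanB_spec poi maxLen (bw.drop start) (bw.drop start).length 1 0 (by omega)
      rw [htake1, pvJoin_singleton, hd1] at hscan
      set best := pvScanB poi maxLen (bw.drop (start + 1)) bw[start] 1 0 with hbest
      have hproc : pvProcB poi maxLen (n + 1) (bw.drop start) =
          if 2 ≤ best then
            bw[start] :: (((bw.drop (start + 1)).take (best - 1)).map (fun t => "##" ++ t) ++
              pvProcB poi maxLen n ((bw.drop (start + 1)).drop (best - 1)))
          else bw[start] :: pvProcB poi maxLen n (bw.drop (start + 1)) := by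
        conv_lhs => rw [hdrop]
        rw [pvProcB]
      rcases hscan with ⟨heq, hnone⟩ | ⟨hlt, hle, hp, hmax⟩
      · -- no match: single word, start += 1
        have hb0 : best = 0 := heq
        have hfind : pvFindA bw poi start (min ((bw.length : Int) - (start : Int)) maxLen).toNat = none := by
          rw [hL]
          exact pvFindA_eq_none _ (fun j h2 hj => hnone j (by omega) hj)
        have htk : bw.take (start + 1) = bw.take start ++ [bw[start]] := by
          rw [List.take_add_one, List.getElem?_eq_getElem h]
          rfl
        rw [pvLoopA, if_pos h]
        split
        · next i heq => rw [hfind] at heq; cases heq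
        · next heq =>
          rw [ih bw (start + 1) (by omega), hproc, if_neg (by omega), htk]
          simp only [List.append_assoc, List.cons_append, List.nil_append]
      · -- match of length best: mark and jump
        have h2b : 2 ≤ best := by omega
        have hfind : pvFindA bw poi start (min ((bw.length : Int) - (start : Int)) maxLen).toNat
            = some best := by
          rw [hL]
          exact pvFindA_eq_some _ _ h2b (by omega) hp hmax
        have htk : bw.take (start + 1) = bw.take start ++ [bw[start]] := by
          rw [List.take_add_one, List.getElem?_eq_getElem h]
          rfl
        rw [pvLoopA, if_pos h]
        split
        · next i heq =>
          rw [hfind] at heq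
          injection heq with heq'
          subst heq'
          have hlelen : start + best ≤ bw.length := by
            simp only [List.length_drop] at hle; omega
          have hmark := pvMark_eq bw start best hlelen (by omega)
          have hpre1 : (bw.take (start + 1)).length = start + 1 := by
            simp only [List.length_take]; omega
          have hpre2 : (((bw.drop (start + 1)).take (best - 1)).map (fun t => "##" ++ t)).length
              = best - 1 := by
            simp only [List.length_map, List.length_take, List.length_drop]; omega
          have hmlen : (pvMark bw start best).length = bw.length := pvMark_length bw start best
          rw [ih (pvMark bw start best) (start + best) (by omega)]
          have hsplit : pvMark bw start best =
              (bw.take (start + 1) ++ ((bw.drop (start + 1)).take (best - 1)).map (fun t => "##" ++ t)) ++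
                bw.drop (start + best) := by
            rw [hmark, List.append_assoc]
          have hplen : (bw.take (start + 1) ++
              ((bw.drop (start + 1)).take (best - 1)).map (fun t => "##" ++ t)).length = start + best := by
            simp only [List.length_append]; omega
          have htakem : (pvMark bw start best).take (start + best)
              = bw.take (start + 1) ++ ((bw.drop (start + 1)).take (best - 1)).map (fun t => "##" ++ t) := by
            rw [hsplit, List.take_left' hplen]
          have hdropm : (pvMark bw start best).drop (start + best) = bw.drop (start + best) := by
            rw [hsplit, List.drop_left' hplen]
          rw [htakem, hdropm]
          rw [hproc, if_pos h2b]
          have hdd : (bw.drop (start + 1)).drop (best - 1) = bw.drop (start + best) := by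
            rw [List.drop_drop]; congr 1; omega
          rw [hdd]
          rw [htk]
          simp only [List.append_assoc, List.cons_append, List.nil_append]
        · next heq => rw [hfind] at heq; cases heq
    · rw [List.drop_eq_nil_of_le (by omega)]
      rw [pvLoopA, if_neg h, pvProcB, List.take_of_length_le (by omega), List.append_nil]

-- ===== VERDICT (by name: the statement is the Claim_ definition above) =====
theorem add_sub_symbol_for_poi_spec : Claim_equal_add_sub_symbol_for_poi := by
  intro bert_tokens query_poi_set _
  unfold Spec_add_sub_symbol_for_poi add_sub_symbol_for_poi add_sub_symbol_for_poi_alt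
  cases query_poi_set with
  | nil => rfl
  | cons q qs =>
    simpa using pvLoopA_eq (q :: qs) ((qs.map PySem.Str.len).foldl max (PySem.Str.len q))
      bert_tokens.length bert_tokens 0 (by omega)
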